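-- pv_equiv track=rewrite | github.com/chtw2001/algorithm | 2023_2nd_semester/23_november_2nd/23631.py | check
-- ===== SOURCE A (Python) =====
-- def check(s, e, n, k):
--     if s >= e:
--         return s
--     mid = (s + e) // 2
--
--     if mid*(mid+1)*k//2 >= n:
--         return check(s, mid, n, k)
--     else:
--         return check(mid + 1, e, n, k)
-- ===== SOURCE B (Python) =====
-- def check(s, e, n, k):
--     # lower_bound-style search over (base, length) instead of a [s,e) pair
--     lo, length = s, e - s
--     while length > 0:
--         half = length // 2
--         mid = lo + half
--         if mid * (mid + 1) * k // 2 >= n: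
--             length = half
--         else:
--             lo = mid + 1
--             length = length - half - 1
--     return lo
-- ===== Notes on version B (the rewrite author's own statement) =====
-- stated objective: alternative
-- what changed: Replaced the tail recursion on the pair (s,e) by an iterative lower_bound-style loop maintaining a base and a remaining window length that is halved each step; same predicate tested at the same midpoints.
import Mathlib
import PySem

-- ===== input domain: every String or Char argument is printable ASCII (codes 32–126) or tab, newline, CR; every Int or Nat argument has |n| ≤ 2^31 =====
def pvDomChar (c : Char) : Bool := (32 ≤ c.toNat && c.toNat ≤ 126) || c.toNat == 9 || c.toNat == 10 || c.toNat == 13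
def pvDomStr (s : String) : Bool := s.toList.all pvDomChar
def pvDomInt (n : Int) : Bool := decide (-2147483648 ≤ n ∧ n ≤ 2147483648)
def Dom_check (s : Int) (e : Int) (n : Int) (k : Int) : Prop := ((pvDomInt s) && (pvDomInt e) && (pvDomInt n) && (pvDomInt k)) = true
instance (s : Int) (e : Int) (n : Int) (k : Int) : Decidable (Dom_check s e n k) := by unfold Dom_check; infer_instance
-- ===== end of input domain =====

-- B replaces A's tail recursion on the pair (s,e) by an iterative lower_bound-style loop over a base and a remaining window length (objective: alternative).

-- ===== PORT A =====
def check (s : Int) (e : Int) (n : Int) (k : Int) : Int :=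
  if s ≥ e then s
  else
    let mid := PySem.Int.floordiv (s + e) 2
    if PySem.Int.floordiv (mid * (mid + 1) * k) 2 ≥ n then check s mid n k
    else check (mid + 1) e n k
termination_by (e - s).toNat
decreasing_by
  · have hlt : PySem.Int.floordiv (s + e) 2 < e :=
      (PySem.Int.floordiv_lt_iff_lt_mul (by norm_num)).mpr (by omega)
    omega
  · have hb := PySem.Int.floordiv_two_mid_bounds (lo := s) (hi := e) (by omega)
    omega

-- ===== PORT B =====
-- the while loop: state (lo, length); half = length ÷ 2, probe lo + half
def checkAltLoop (n : Int) (k : Int) (lo : Int) (len : Int) : Int :=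
  if len > 0 then
    let half := PySem.Int.floordiv len 2
    let mid := lo + half
    if PySem.Int.floordiv (mid * (mid + 1) * k) 2 ≥ n then
      checkAltLoop n k lo half
    else
      checkAltLoop n k (mid + 1) (len - half - 1)
  else lo
termination_by len.toNat
decreasing_by
  · have h1 : 0 ≤ PySem.Int.floordiv len 2 :=
      (PySem.Int.le_floordiv_iff_mul_le (by norm_num)).mpr (by omega)
    have h2 : PySem.Int.floordiv len 2 < len :=
      (PySem.Int.floordiv_lt_iff_lt_mul (by norm_num)).mpr (by omega)
    omega
  · have h1 : 0 ≤ PySem.Int.floordiv len 2 :=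
      (PySem.Int.le_floordiv_iff_mul_le (by norm_num)).mpr (by omega)
    omega

def check_alt (s : Int) (e : Int) (n : Int) (k : Int) : Int :=
  checkAltLoop n k s (e - s)

-- ===== PRECONDITION & SPEC =====
def Spec_check (s : Int) (e : Int) (n : Int) (k : Int) (out : Int) : Prop := out = check_alt s e n k
instance (s : Int) (e : Int) (n : Int) (k : Int) (out : Int) : Decidable (Spec_check s e n k out) := by unfold Spec_check; infer_instance

-- ===== CLAIM =====
def Claim_equal_check : Prop := ∀ (s : Int) (e : Int) (n : Int) (k : Int), Dom_check s e n k → Spec_check s e n k (check s e n k)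

-- ===== LEMMAS AND PROOFS =====
-- midpoint bridge: (s+e)//2 = s + (e-s)//2 (exact because 2s is even)
lemma mid_shift (s e : Int) : PySem.Int.floordiv (s + e) 2 = s + PySem.Int.floordiv (e - s) 2 := by
  rw [PySem.Int.floordiv_eq_ediv_of_pos (by norm_num), PySem.Int.floordiv_eq_ediv_of_pos (by norm_num)]
  omega

lemma check_eq_loop (m : Nat) : ∀ (s e n k : Int), (e - s).toNat ≤ m →
    check s e n k = checkAltLoop n k s (e - s) := by
  induction m with
  | zero =>
    intro s e n k h
    have hse : s ≥ e := by omega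
    rw [check, checkAltLoop]
    simp [hse, show ¬ e - s > 0 by omega]
  | succ m ih =>
    intro s e n k h
    by_cases hse : s < e
    · have hb := PySem.Int.floordiv_two_mid_bounds (lo := s) (hi := e) (by omega)
      have hlt : PySem.Int.floordiv (s + e) 2 < e :=
        (PySem.Int.floordiv_lt_iff_lt_mul (by norm_num)).mpr (by omega)
      have hms := mid_shift s e
      rw [check, checkAltLoop]
      simp only [not_le.mpr hse, if_false, gt_iff_lt, show (0:Int) < e - s by omega, if_true]
      rw [← hms]
      split_ifs with hc
      · rw [ih s (PySem.Int.floordiv (s + e) 2) n k (by omega)]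
        congr 1
        omega
      · rw [ih (PySem.Int.floordiv (s + e) 2 + 1) e n k (by omega)]
        congr 1
        omega
    · rw [check, checkAltLoop]
      simp [not_lt.mp hse, show ¬ e - s > 0 by omega]

-- ===== VERDICT =====
theorem check_spec : Claim_equal_check := by
  intro s e n k _
  unfold Spec_check check_alt
  exact check_eq_loop (e - s).toNat s e n k le_rfl
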